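-- pv_equiv track=rewrite | github.com/jonathangouvea/RU-Bot | main.py | decorador
-- ===== SOURCE A (Python) =====
-- def decorador(refeicao):
--     textao = ''
--     textos = ['**Prato Principal**', '**Prato Vegetariano**', '**Guarnição**', '**Arroz**', '**Feijão**', '**Saladas**', '**Sobremesa**']
--
--     emojis = [' :poultry_leg: ', ' :cooking: ', ' :potato: ', ' :curry: ', ' :curry: ', ' :salad: ', ' :apple: ']
--
--     i = 0
--     for r in refeicao:
--       if i == 0:
--         C = r.find("/")
--         textao += "{2}{0}: {1}\n".format(textos[i], r[0:C], emojis[i])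
--         i += 1
--         textao += "{2}{0}: {1}\n".format(textos[i], r[C+2::], emojis[i])
--       else:
--         textao += "{2}{0}: {1}\n".format(textos[i], r, emojis[i])
--       i += 1
--     textao += '\n'
--     return textao
-- ===== SOURCE B (Python) =====
-- def decorador(refeicao):
--     textos = ['**Prato Principal**', '**Prato Vegetariano**', '**Guarnição**', '**Arroz**', '**Feijão**', '**Saladas**', '**Sobremesa**']
--     emojis = [' :poultry_leg: ', ' :cooking: ', ' :potato: ', ' :curry: ', ' :curry: ', ' :salad: ', ' :apple: ']
--     prefixos = [e + t + ": " for e, t in zip(emojis, textos)]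
--
--     def monta(itens, prefs):
--         if not itens:
--             return "\n"
--         return prefs[0] + itens[0] + "\n" + monta(itens[1:], prefs[1:])
--
--     if not refeicao:
--         return monta([], prefixos)
--     cab, resto = refeicao[0], refeicao[1:]
--     C = cab.find("/")
--     return monta([cab[:C], cab[C + 2:]] + resto, prefixos)
-- ===== Notes on version B (the rewrite author's own statement) =====
-- stated objective: alternative
-- what changed: Replaces A's single indexed accumulator loop with a staged decomposition: a prefix list is built once by zipping emojis with labels, the first element's slash split happens before any formatting, and the text is assembled back-to-front by a recursive pairwise walk down the items and prefix lists with no index variable at all.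
import Mathlib
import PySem

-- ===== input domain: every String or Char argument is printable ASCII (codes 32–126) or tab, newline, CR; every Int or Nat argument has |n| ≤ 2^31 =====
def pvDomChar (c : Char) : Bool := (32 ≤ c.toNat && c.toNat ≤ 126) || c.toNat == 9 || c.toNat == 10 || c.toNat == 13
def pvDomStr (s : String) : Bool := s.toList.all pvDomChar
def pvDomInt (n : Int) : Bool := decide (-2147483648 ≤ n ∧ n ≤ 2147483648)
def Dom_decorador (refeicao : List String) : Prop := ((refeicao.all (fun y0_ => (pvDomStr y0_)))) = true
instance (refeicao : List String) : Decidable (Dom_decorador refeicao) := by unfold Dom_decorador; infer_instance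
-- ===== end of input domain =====

-- B zips the emoji/label prefixes once, splits the first element up front, and assembles the
-- text by a recursive pairwise walk with no index variable; objective: alternative.

-- ===== PORT A =====
def textosA : List (List Char) := ["**Prato Principal**".toList, "**Prato Vegetariano**".toList, "**Guarnição**".toList, "**Arroz**".toList, "**Feijão**".toList, "**Saladas**".toList, "**Sobremesa**".toList]
def emojisA : List (List Char) := [" :poultry_leg: ".toList, " :cooking: ".toList, " :potato: ".toList, " :curry: ".toList, " :curry: ".toList, " :salad: ".toList, " :apple: ".toList]

-- loop body of A; textos[i]/emojis[i] via pyGetD, in range under Pre_ (Python raises IndexError past it)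
def decoradorStep (st : List Char × Int) (r : String) : List Char × Int :=
  let textao := st.1
  let i := st.2
  if i = 0 then
    let C := PySem.Chars.find r.toList "/".toList
    let textao := textao ++ PySem.List.pyGetD emojisA i [] ++ PySem.List.pyGetD textosA i [] ++ (": ").toList ++ PySem.List.slice r.toList (some 0) (some C) ++ ['\n']
    let i := i + 1
    let textao := textao ++ PySem.List.pyGetD emojisA i [] ++ PySem.List.pyGetD textosA i [] ++ (": ").toList ++ PySem.List.slice r.toList (some (C + 2)) none ++ ['\n']
    (textao, i + 1)
  else
    (textao ++ PySem.List.pyGetD emojisA i [] ++ PySem.List.pyGetD textosA i [] ++ (": ").toList ++ r.toList ++ ['\n'], i + 1)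

def decorador (refeicao : List String) : String :=
  String.ofList ((refeicao.foldl decoradorStep ([], 0)).1 ++ ['\n'])

-- ===== PORT B =====
def textosB : List (List Char) := ["**Prato Principal**".toList, "**Prato Vegetariano**".toList, "**Guarnição**".toList, "**Arroz**".toList, "**Feijão**".toList, "**Saladas**".toList, "**Sobremesa**".toList]
def emojisB : List (List Char) := [" :poultry_leg: ".toList, " :cooking: ".toList, " :potato: ".toList, " :curry: ".toList, " :curry: ".toList, " :salad: ".toList, " :apple: ".toList]

-- prefixos = [e + t + ": " for e, t in zip(emojis, textos)]
def prefixosB : List (List Char) := (emojisB.zip textosB).map (fun p => p.1 ++ p.2 ++ (": ").toList)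

-- recursive pairwise walk; Python's prefs[0] raises IndexError when prefs runs out
-- (unreachable inside Pre_), the port returns [] there
def montaB : List (List Char) → List (List Char) → List Char
  | [], _ => ['\n']
  | _ :: _, [] => []
  | it :: its, p :: ps => p ++ it ++ ['\n'] ++ montaB its ps

def decorador_alt (refeicao : List String) : String :=
  match refeicao with
  | [] => String.ofList (montaB [] prefixosB)
  | cab :: resto =>
    let C := PySem.Chars.find cab.toList "/".toList
    String.ofList (montaB (PySem.List.slice cab.toList (some 0) (some C) :: PySem.List.slice cab.toList (some (C + 2)) none :: resto.map String.toList) prefixosB)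

-- ===== PRECONDITION & SPEC =====
-- Pre_ excludes lists with 7 or more elements, on which Python A raises IndexError (textos has 7 entries and the first element consumes two).
def Pre_decorador (refeicao : List String) : Prop := refeicao.length ≤ 6
instance (refeicao : List String) : Decidable (Pre_decorador refeicao) := by unfold Pre_decorador; infer_instance
def pvWitness_decorador : List String := ["Frango / Ovo", "Batata"]

def Spec_decorador (refeicao : List String) (out : String) : Prop := out = decorador_alt refeicao
instance (refeicao : List String) (out : String) : Decidable (Spec_decorador refeicao out) := by unfold Spec_decorador; infer_instance

-- ===== CLAIM (what is proved, stated in full; the proofs are below) =====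
def Claim_equal_decorador : Prop := ∀ (refeicao : List String), Dom_decorador refeicao → Pre_decorador refeicao → Spec_decorador refeicao (decorador refeicao)

-- ===== LEMMAS AND PROOFS =====

-- A's table lookup at index n < 7 is B's n-th prefix, and the prefix list keeps going
lemma pref_get (n : Nat) (h : n < 7) :
    prefixosB.drop n
      = (PySem.List.pyGetD emojisA (n : Int) [] ++ PySem.List.pyGetD textosA (n : Int) [] ++ (": ").toList)
        :: prefixosB.drop (n + 1) := by
  interval_cases n <;> rfl

-- after the first element, A's indexed loop is B's pairwise walk over the remaining prefixes
lemma decorador_loop (rest : List String) (t : List Char) (n : Nat) (h1 : 1 ≤ n) (h2 : n + rest.length ≤ 7) :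
    (rest.foldl decoradorStep (t, (n : Int))).1 ++ ['\n']
      = t ++ montaB (rest.map String.toList) (prefixosB.drop n) := by
  induction rest generalizing t n with
  | nil => simp [montaB]
  | cons r rs ih =>
      have hn : ¬ ((n : Int) = 0) := by omega
      have hstep : decoradorStep (t, (n : Int)) r
          = (t ++ (PySem.List.pyGetD emojisA (n : Int) [] ++ PySem.List.pyGetD textosA (n : Int) [] ++ (": ").toList ++ r.toList ++ ['\n']), ((n + 1 : Nat) : Int)) := by
        simp only [decoradorStep, if_neg hn, List.append_assoc]
        simp
      rw [List.foldl_cons, hstep, ih _ (n + 1) (by omega) (by simp at h2 ⊢; omega),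
        pref_get n (by simp at h2; omega)]
      simp [montaB, List.append_assoc]

theorem decorador_spec : Claim_equal_decorador := by
  unfold Claim_equal_decorador
  intro refeicao _ hpre
  unfold Spec_decorador decorador decorador_alt
  cases refeicao with
  | nil => rfl
  | cons r0 rest =>
      simp only [List.foldl_cons]
      have h0 : decoradorStep ([], 0) r0
          = ((PySem.List.pyGetD emojisA (0 : Int) [] ++ PySem.List.pyGetD textosA (0 : Int) [] ++ (": ").toList ++ PySem.List.slice r0.toList (some 0) (some (PySem.Chars.find r0.toList "/".toList)) ++ ['\n'])
             ++ (PySem.List.pyGetD emojisA (1 : Int) [] ++ PySem.List.pyGetD textosA (1 : Int) [] ++ (": ").toList ++ PySem.List.slice r0.toList (some (PySem.Chars.find r0.toList "/".toList + 2)) none ++ ['\n']), ((2 : Nat) : Int)) := by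
        simp [decoradorStep, List.append_assoc]
      have hlen : rest.length ≤ 5 := by
        unfold Pre_decorador at hpre; simp at hpre; omega
      rw [h0, decorador_loop rest _ 2 (by omega) (by omega)]
      conv_rhs => rw [show prefixosB = List.drop 0 prefixosB from List.drop_zero.symm, pref_get 0 (by omega), pref_get 1 (by omega)]
      simp [montaB, List.append_assoc]
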